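-- pv_equiv track=rewrite | github.com/GengJiahao121/Enhanced-BiSyn_GAT_plus | dataloader.py | get_con_node_leafs_token_map
-- ===== SOURCE A (Python) =====
-- def get_con_node_leafs_token_map(con_leaf, tokens):
--     con_leaf_token_map = {}
--     for con_node_index in con_leaf.keys():
--         con_leaf_token_map[con_node_index] = [0] * len(tokens)
--     for con_node_index, leaf_tokens in con_leaf.items():
--         for idx,token in enumerate(tokens):
--             if token in leaf_tokens:
--                 con_leaf_token_map[con_node_index][idx] = 1
--             else:
--                 pass
--     return con_leaf_token_map
-- ===== SOURCE B (Python) =====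
-- def get_con_node_leafs_token_map(con_leaf, tokens):
--     # inverted index: token value -> all its positions in tokens
--     pos = {}
--     for i, t in enumerate(tokens):
--         pos[t] = pos.get(t, []) + [i]
--     con_leaf_token_map = {}
--     for con_node_index, leaf_tokens in con_leaf.items():
--         row = [0] * len(tokens)
--         for t in leaf_tokens:
--             for i in pos.get(t, []):
--                 row[i] = 1
--         con_leaf_token_map[con_node_index] = row
--     return con_leaf_token_map
-- ===== Notes on version B (the rewrite author's own statement) =====
-- stated objective: faster
-- what changed: B builds an inverted index from token value to all its positions once, then for each node walks only its leaf tokens and sets the indexed positions, replacing A's per-node rescan of the whole token list with a linear-time membership test over leaf_tokens at every position.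
import Mathlib
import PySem

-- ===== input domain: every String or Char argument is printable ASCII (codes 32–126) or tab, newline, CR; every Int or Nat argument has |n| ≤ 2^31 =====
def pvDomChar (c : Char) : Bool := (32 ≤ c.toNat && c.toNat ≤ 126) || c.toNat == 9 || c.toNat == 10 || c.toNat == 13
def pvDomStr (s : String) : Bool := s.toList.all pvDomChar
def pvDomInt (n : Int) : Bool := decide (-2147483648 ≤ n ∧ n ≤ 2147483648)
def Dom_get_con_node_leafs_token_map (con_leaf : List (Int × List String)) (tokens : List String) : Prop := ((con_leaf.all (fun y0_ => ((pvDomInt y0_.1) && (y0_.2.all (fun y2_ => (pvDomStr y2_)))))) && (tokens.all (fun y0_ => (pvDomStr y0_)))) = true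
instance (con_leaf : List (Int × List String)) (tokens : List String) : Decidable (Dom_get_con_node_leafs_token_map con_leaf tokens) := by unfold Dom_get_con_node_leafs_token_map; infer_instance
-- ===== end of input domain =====

-- B replaces A's per-node rescan of all tokens by an inverted index token → positions built once (alternative data-structure; same results).

-- shared tiny helper: the Python statement `row[i] = 1`; exact here because every
-- index it is applied to comes from enumerate(tokens), hence 0 ≤ i < len(row)
def pvSetOne (row : List Int) (i : Int) : List Int := row.set i.toNat 1

-- ===== PORT A =====
-- con_leaf is a Python dict, passed as its item list; .keys() are the first components.
-- `con_leaf_token_map[k][idx] = 1` is ported as Dict.modify (the key is always present, prefilled by the first loop).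
def get_con_node_leafs_token_map (con_leaf : List (Int × List String)) (tokens : List String) : List (Int × List Int) :=
  let m0 : PySem.Dict Int (List Int) :=
    (con_leaf.map (·.1)).foldl (fun d k => d.insert k (List.replicate tokens.length 0)) PySem.Dict.empty
  let m1 : PySem.Dict Int (List Int) :=
    con_leaf.foldl (fun d p =>
      (PySem.List.enumerate tokens).foldl (fun d it =>
        if p.2.contains it.2 then d.modify p.1 [] (fun row => pvSetOne row it.1) else d) d) m0
  m1.items

-- ===== PORT B =====
-- `pos[t] = pos.get(t, []) + [i]` is exactly Dict.modify t [] (· ++ [i])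
def get_con_node_leafs_token_map_alt (con_leaf : List (Int × List String)) (tokens : List String) : List (Int × List Int) :=
  let pos : PySem.Dict String (List Int) :=
    (PySem.List.enumerate tokens).foldl (fun d it => d.modify it.2 [] (· ++ [it.1])) PySem.Dict.empty
  let out : PySem.Dict Int (List Int) :=
    con_leaf.foldl (fun d p =>
      d.insert p.1 (p.2.foldl (fun row t =>
        (pos.getD t []).foldl (fun row i => pvSetOne row i) row)
        (List.replicate tokens.length 0))) PySem.Dict.empty
  out.items

-- ===== PRECONDITION & SPEC =====
-- Pre_ excludes association lists with duplicate keys: con_leaf is a Python dict, whose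
-- item list can never carry a duplicate key, so such lists encode no Python input at all.
def Pre_get_con_node_leafs_token_map (con_leaf : List (Int × List String)) (tokens : List String) : Prop :=
  (con_leaf.map (·.1)).Nodup
instance (con_leaf : List (Int × List String)) (tokens : List String) : Decidable (Pre_get_con_node_leafs_token_map con_leaf tokens) := by unfold Pre_get_con_node_leafs_token_map; infer_instance
def pvWitness_get_con_node_leafs_token_map : (List (Int × List String)) × List String :=
  ([(0, ["a", "c"]), (1, ["b"])], ["a", "b", "a"])

def Spec_get_con_node_leafs_token_map (con_leaf : List (Int × List String)) (tokens : List String) (out : List (Int × List Int)) : Prop := out = get_con_node_leafs_token_map_alt con_leaf tokens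
instance (con_leaf : List (Int × List String)) (tokens : List String) (out : List (Int × List Int)) : Decidable (Spec_get_con_node_leafs_token_map con_leaf tokens out) := by unfold Spec_get_con_node_leafs_token_map; infer_instance

-- ===== CLAIM (what is proved, stated in full; the proofs are below) =====
def Claim_equal_get_con_node_leafs_token_map : Prop := ∀ (con_leaf : List (Int × List String)) (tokens : List String), Dom_get_con_node_leafs_token_map con_leaf tokens → Pre_get_con_node_leafs_token_map con_leaf tokens → Spec_get_con_node_leafs_token_map con_leaf tokens (get_con_node_leafs_token_map con_leaf tokens)

-- ===== LEMMAS AND PROOFS =====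

-- A's row for one node: scan tokens, test membership in the node's leaf tokens
def pvRowA (tokens : List String) (L : List String) : List Int :=
  (PySem.List.enumerate tokens).foldl
    (fun row it => if L.contains it.2 then pvSetOne row it.1 else row)
    (List.replicate tokens.length 0)

-- B's inverted index and row
def pvPos (tokens : List String) : PySem.Dict String (List Int) :=
  (PySem.List.enumerate tokens).foldl (fun d it => d.modify it.2 [] (· ++ [it.1])) PySem.Dict.empty

def pvRowB (tokens : List String) (L : List String) : List Int :=
  L.foldl (fun row t => ((pvPos tokens).getD t []).foldl (fun row i => pvSetOne row i) row)
    (List.replicate tokens.length 0)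

theorem pvSetOnes_getElem? (is : List Int) (r : List Int) (j : Nat) :
    (is.foldl (fun r i => pvSetOne r i) r)[j]? =
      if (∃ i ∈ is, i.toNat = j) ∧ j < r.length then some 1 else r[j]? := by
  induction is generalizing r with
  | nil => simp
  | cons i is ih =>
    rw [List.foldl_cons, ih]
    simp only [pvSetOne, List.length_set, List.getElem?_set, List.mem_cons]
    split_ifs <;> try (first | rfl | tauto)
    · next h1 h =>
        obtain ⟨⟨x, hx, hxj⟩, hj⟩ := h1
        exact absurd ⟨⟨x, List.mem_cons_of_mem _ hx, hxj⟩, hj⟩ h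
    · next h3 h2 h1 h =>
        exact absurd ⟨⟨i, List.mem_cons_self .., h2⟩, h2 ▸ h1⟩ h
    · next h3 h2 h1 h =>
        exact absurd (h2 ▸ h.2) h1
    · next h3 h2 h1 h =>
        exact (List.getElem?_eq_none (by omega)).symm
    · next h2 hne h =>
        obtain ⟨⟨x, hx, hxj⟩, hj⟩ := h
        rcases List.mem_cons.mp hx with rfl | hx
        · exact absurd hxj hne
        · exact absurd ⟨⟨x, hx, hxj⟩, hj⟩ h2

theorem pvPos_getD (tokens : List String) (t : String) :
    (pvPos tokens).getD t [] =
      ((PySem.List.enumerate tokens).filter (fun it => it.2 == t)).map (·.1) := by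
  have h : pvPos tokens =
      ((PySem.List.enumerate tokens).map Prod.swap).foldl
        (fun d p => d.modify p.1 [] (· ++ [p.2])) PySem.Dict.empty := by
    rw [List.foldl_map]; rfl
  rw [h, PySem.Dict.getD_foldl_modify_append]
  simp [List.filter_map, List.map_map, Function.comp_def]

theorem pvRow_eq (tokens : List String) (L : List String) :
    pvRowA tokens L = pvRowB tokens L := by
  have hA : pvRowA tokens L =
      ((PySem.List.enumerate tokens).filterMap
          (fun it => if L.contains it.2 then some it.1 else none)).foldl
        (fun r i => pvSetOne r i) (List.replicate tokens.length 0) := by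
    rw [List.foldl_filterMap, pvRowA]
    congr 1
    funext row it
    by_cases h : it.2 ∈ L <;> simp [h]
  have hB : pvRowB tokens L =
      (L.flatMap (fun t => (pvPos tokens).getD t [])).foldl
        (fun r i => pvSetOne r i) (List.replicate tokens.length 0) := by
    rw [List.foldl_flatMap]; rfl
  rw [hA, hB]
  apply List.ext_getElem?
  intro j
  rw [pvSetOnes_getElem?, pvSetOnes_getElem?]
  have hmem :
      (∃ i ∈ (PySem.List.enumerate tokens).filterMap
          (fun it => if L.contains it.2 then some it.1 else none), i.toNat = j) ↔
      (∃ i ∈ L.flatMap (fun t => (pvPos tokens).getD t []), i.toNat = j) := by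
    constructor
    · rintro ⟨i, hi, hij⟩
      rw [List.mem_filterMap] at hi
      obtain ⟨it, hit, hfi⟩ := hi
      simp at hfi
      obtain ⟨hmemL, rfl⟩ := hfi
      refine ⟨it.1, ?_, hij⟩
      rw [List.mem_flatMap]
      refine ⟨it.2, hmemL, ?_⟩
      rw [pvPos_getD, List.mem_map]
      exact ⟨it, List.mem_filter.mpr ⟨hit, by simp⟩, rfl⟩
    · rintro ⟨i, hi, hij⟩
      rw [List.mem_flatMap] at hi
      obtain ⟨t, htL, hi⟩ := hi
      rw [pvPos_getD, List.mem_map] at hi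
      obtain ⟨it, hitf, rfl⟩ := hi
      rw [List.mem_filter] at hitf
      have heq : it.2 = t := by simpa using hitf.2
      refine ⟨it.1, ?_, hij⟩
      rw [List.mem_filterMap]
      refine ⟨it, hitf.1, ?_⟩
      simp [heq, htL]
  simp only [hmem]

-- items after the inner A-loop for one node: only the entry at key k changes,
-- accumulating A's row fold over its current value
theorem pvInnerA (L : List String) (k : Int)
    (es : List (Int × String)) :
    ∀ (a : List Int) (pre suf : List (Int × List Int)) (d : PySem.Dict Int (List Int)),
    d.items = pre ++ (k, a) :: suf →
    (pre.map (·.1) ++ k :: suf.map (·.1)).Nodup →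
    (es.foldl (fun d it =>
        if L.contains it.2 then d.modify k [] (fun row => pvSetOne row it.1) else d) d).items
      = pre ++ (k, es.foldl (fun row it => if L.contains it.2 then pvSetOne row it.1 else row) a) :: suf := by
  induction es with
  | nil => intro a pre suf d hd _; simpa using hd
  | cons it es ih =>
    intro a pre suf d hd hnd
    rw [List.foldl_cons, List.foldl_cons]
    by_cases hc : L.contains it.2
    · simp only [hc, if_true]
      have hkeys : d.keys = pre.map (·.1) ++ k :: suf.map (·.1) := by
        simp [PySem.Dict.keys, hd]
      have hknd : d.keys.Nodup := by rw [hkeys]; exact hnd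
      have hmem : (k, a) ∈ d.items := by rw [hd]; simp
      have hgetD : d.getD k [] = a := PySem.Dict.getD_of_mem_items d hmem hknd []
      have hcont : d.contains k = true := by
        rw [PySem.Dict.contains_iff_mem_keys, hkeys]; simp
      have hmod : d.modify k [] (fun row => pvSetOne row it.1)
          = d.insert k (pvSetOne (d.getD k []) it.1) := rfl
      have hitems : (d.modify k [] (fun row => pvSetOne row it.1)).items
          = pre ++ (k, pvSetOne a it.1) :: suf := by
        rw [hmod, PySem.Dict.items_insert_of_contains _ _ hcont, hgetD, hd]
        rw [List.map_append, List.map_cons]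
        congr 1
        · refine (List.map_congr_left ?_).trans (List.map_id pre)
          intro q hq
          have : q.1 ≠ k := by
            intro h
            have h1 : q.1 ∈ pre.map (·.1) := List.mem_map_of_mem hq
            rw [h] at h1
            have := (List.nodup_append.mp hnd).2.2
            exact this k h1 k (List.mem_cons_self ..) rfl
          simp [this]
        · congr 1
          · simp
          · refine (List.map_congr_left ?_).trans (List.map_id suf)
            intro q hq
            have : q.1 ≠ k := by
              intro h
              have h1 : q.1 ∈ suf.map (·.1) := List.mem_map_of_mem hq
              have := (List.nodup_append.mp hnd).2.1
              rw [h] at h1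
              exact (List.nodup_cons.mp this).1 h1
            simp [this]
      exact ih (pvSetOne a it.1) pre suf _ hitems hnd
    · simp only [hc]
      exact ih a pre suf d hd hnd

-- items after A's whole second loop, over nodes with pairwise-distinct keys
theorem pvOuterA (tokens : List String) (ps : List (Int × List String)) :
    ∀ (pre : List (Int × List Int)) (d : PySem.Dict Int (List Int)),
    d.items = pre ++ ps.map (fun p => (p.1, List.replicate tokens.length 0)) →
    (pre.map (·.1) ++ ps.map (·.1)).Nodup →
    (ps.foldl (fun d p =>
        (PySem.List.enumerate tokens).foldl (fun d it =>
          if p.2.contains it.2 then d.modify p.1 [] (fun row => pvSetOne row it.1) else d) d) d).items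
      = pre ++ ps.map (fun p => (p.1, pvRowA tokens p.2)) := by
  induction ps with
  | nil => intro pre d hd _; simpa using hd
  | cons p ps ih =>
    intro pre d hd hnd
    rw [List.foldl_cons]
    have hnd' : (pre.map (·.1) ++ p.1 :: ps.map (·.1)).Nodup := by simpa using hnd
    have h1 := pvInnerA p.2 p.1 (PySem.List.enumerate tokens)
      (List.replicate tokens.length 0) pre (ps.map (fun p => (p.1, List.replicate tokens.length 0)))
      d (by simpa using hd) (by simpa [List.map_map, Function.comp_def] using hnd')
    have h2 := ih (pre ++ [(p.1, pvRowA tokens p.2)]) _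
      (by rw [h1]; simp [pvRowA])
      (by simpa [List.append_assoc] using hnd')
    rw [h2]
    simp
  
-- ===== VERDICT (by name: the statement is the Claim_ definition above) =====
theorem get_con_node_leafs_token_map_spec : Claim_equal_get_con_node_leafs_token_map := by
  intro con_leaf tokens _ hpre
  unfold Spec_get_con_node_leafs_token_map
  unfold Pre_get_con_node_leafs_token_map at hpre
  have hadef : get_con_node_leafs_token_map con_leaf tokens
      = (con_leaf.foldl (fun d p =>
          (PySem.List.enumerate tokens).foldl (fun d it =>
            if p.2.contains it.2 then d.modify p.1 [] (fun row => pvSetOne row it.1) else d) d)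
          ((con_leaf.map (·.1)).foldl (fun d k => d.insert k (List.replicate tokens.length 0))
            PySem.Dict.empty)).items := rfl
  have hbdef : get_con_node_leafs_token_map_alt con_leaf tokens
      = (con_leaf.foldl (fun d p => d.insert p.1 (pvRowB tokens p.2))
          (PySem.Dict.empty : PySem.Dict Int (List Int))).items := rfl
  have hm0 := PySem.Dict.items_foldl_insert_fresh (con_leaf.map (·.1)) (fun x => x)
    (fun _ => (List.replicate tokens.length 0 : List Int)) (PySem.Dict.empty : PySem.Dict Int (List Int))
    (by intro a _; simp) (by simpa using hpre)
  have hB := PySem.Dict.items_foldl_insert_fresh con_leaf (fun p => p.1)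
    (fun p => pvRowB tokens p.2) (PySem.Dict.empty : PySem.Dict Int (List Int))
    (by intro a _; simp) hpre
  rw [hadef, hbdef]
  rw [pvOuterA tokens con_leaf [] _ (by simpa [List.map_map, Function.comp_def] using hm0)
    (by simpa using hpre)]
  rw [hB]
  simp only [List.nil_append]
  have hemp : (PySem.Dict.empty : PySem.Dict Int (List Int)).items = [] := rfl
  rw [hemp, List.nil_append]
  exact List.map_congr_left (fun p _ => by rw [pvRow_eq])
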